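-- pv_equiv track=rewrite | github.com/shaheer-shehri/Live-Intrusion-Detection-System | domain_watcher.py | _match_scenario
-- ===== SOURCE A (Python) =====
-- from typing import Callable, Dict, Optional, Set
--
-- WATCH_DOMAINS: Dict[str, str] = {
--     "testphp.vulnweb.com":  "exploits",
--     "vulnweb.com":          "exploits",
--     "ddostest.me":          "dos",
--     "scanme.nmap.org":      "recon",
--     "nmap.org":             "recon",
--     "hackthissite.org":     "generic",
--     "www.hackthissite.org": "generic",
--     "webscantest.com":      "fuzzers",
--     "www.webscantest.com":  "fuzzers",
-- }
--
-- def _match_scenario(qname: str) -> Optional[str]: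
--     qname = qname.lower().rstrip(".")
--     if qname in WATCH_DOMAINS:
--         return WATCH_DOMAINS[qname]
--     for domain, scenario in WATCH_DOMAINS.items():
--         if qname.endswith("." + domain):
--             return scenario
--     return None
-- ===== SOURCE B (Python) =====
-- from typing import Dict, Optional
--
-- WATCH_DOMAINS: Dict[str, str] = {
--     "testphp.vulnweb.com":  "exploits",
--     "vulnweb.com":          "exploits",
--     "ddostest.me":          "dos",
--     "scanme.nmap.org":      "recon",
--     "nmap.org":             "recon",
--     "hackthissite.org":     "generic",
--     "www.hackthissite.org": "generic",
--     "webscantest.com":      "fuzzers",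
--     "www.webscantest.com":  "fuzzers",
-- }
--
-- def _match_scenario(qname: str) -> Optional[str]:
--     cand = qname.lower().rstrip(".")
--     while True:
--         if cand in WATCH_DOMAINS:
--             return WATCH_DOMAINS[cand]
--         _head, sep, tail = cand.partition(".")
--         if not sep:
--             return None
--         cand = tail
-- ===== Notes on version B (the rewrite author's own statement) =====
-- stated objective: alternative
-- what changed: Instead of scanning the whole watchlist testing each entry as a dotted suffix of the query, B repeatedly peels the leftmost label off the query (str.partition) and does a direct dict lookup on each remaining suffix, returning the most-specific match; equivalent because any two watchlist keys that are dot-suffix-related carry the same scenario.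
import Mathlib
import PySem

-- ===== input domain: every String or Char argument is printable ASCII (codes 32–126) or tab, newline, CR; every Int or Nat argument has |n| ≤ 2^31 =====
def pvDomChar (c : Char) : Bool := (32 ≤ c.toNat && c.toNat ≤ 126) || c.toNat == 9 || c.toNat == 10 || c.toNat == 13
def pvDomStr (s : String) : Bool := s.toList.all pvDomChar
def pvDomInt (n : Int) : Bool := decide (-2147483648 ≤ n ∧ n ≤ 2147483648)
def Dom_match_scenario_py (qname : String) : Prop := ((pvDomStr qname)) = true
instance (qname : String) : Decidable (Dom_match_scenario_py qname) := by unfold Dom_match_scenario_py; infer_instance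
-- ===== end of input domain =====

-- B replaces A's endswith scan over the watchlist by peeling the leftmost label off the query and
-- doing a direct dict lookup on each suffix (alternative decomposition, same observable behaviour).

-- ===== PORT A =====
-- the module constant WATCH_DOMAINS (Python dict -> PySem.Dict, insertion order)
def WATCH_DOMAINS : PySem.Dict String String := PySem.Dict.mk
  [("testphp.vulnweb.com", "exploits"),
   ("vulnweb.com",         "exploits"),
   ("ddostest.me",         "dos"),
   ("scanme.nmap.org",     "recon"),
   ("nmap.org",            "recon"),
   ("hackthissite.org",    "generic"),
   ("www.hackthissite.org","generic"),
   ("webscantest.com",     "fuzzers"),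
   ("www.webscantest.com", "fuzzers")]

-- s.rstrip(".") ported by hand on List Char: drop trailing '.' characters (exact for str.rstrip("."))
def rstripDot (s : List Char) : List Char := (s.reverse.dropWhile (fun c => c == '.')).reverse

-- A's loop: for domain, scenario in WATCH_DOMAINS.items(): if qname.endswith("." + domain): return scenario
-- ("." + domain is ported as String.ofList ('.' :: domain.toList), exact for string concatenation)
def scanWatch (q : String) : List (String × String) → Option String
  | [] => none
  | (domain, scenario) :: rest =>
      if PySem.Str.endswith q (String.ofList ('.' :: domain.toList)) then some scenario
      else scanWatch q rest

def match_scenario_py (qname : String) : Option String :=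
  let q := String.ofList (rstripDot (PySem.Str.lower qname).toList)
  if WATCH_DOMAINS.contains q then WATCH_DOMAINS.get? q
  else scanWatch q WATCH_DOMAINS.items

-- ===== PORT B =====
-- B's while loop: look the candidate up directly; if absent, drop its leftmost label.
-- cand.partition(".")[2] is ported by hand as (cand.dropWhile (· != '.')).tail — exact: everything after the first '.'
def bLoop (cand : List Char) : Option String :=
  if WATCH_DOMAINS.contains (String.ofList cand) then WATCH_DOMAINS.get? (String.ofList cand)
  else if h : '.' ∈ cand then bLoop ((cand.dropWhile (fun c => c != '.')).tail)
  else none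
termination_by cand.length
decreasing_by
  have h1 := List.length_dropWhile_le (fun c => c != '.') cand
  have h2 : cand.dropWhile (fun c => c != '.') ≠ [] := by
    intro hnil
    have := List.dropWhile_eq_nil_iff.mp hnil '.' h
    simp at this
  have h3 : 0 < (cand.dropWhile (fun c => c != '.')).length := List.length_pos_iff.mpr h2
  simp [List.length_tail]
  omega

def match_scenario_py_alt (qname : String) : Option String :=
  bLoop (rstripDot (PySem.Str.lower qname).toList)

-- ===== PRECONDITION & SPEC =====
def Spec_match_scenario_py (qname : String) (out : Option String) : Prop := out = match_scenario_py_alt qname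
instance (qname : String) (out : Option String) : Decidable (Spec_match_scenario_py qname out) := by unfold Spec_match_scenario_py; infer_instance

-- ===== CLAIM (what is proved, stated in full; the proofs are below) =====
def Claim_equal_match_scenario_py : Prop := ∀ (qname : String), Dom_match_scenario_py qname → Spec_match_scenario_py qname (match_scenario_py qname)

-- ===== LEMMAS AND PROOFS =====

-- d "matches" candidate c: exact hit, or d is a dot-aligned proper suffix of c
def KeyMatch (d c : List Char) : Prop := d = c ∨ ('.' :: d) <:+ c

theorem contains_char (c : List Char) :
    WATCH_DOMAINS.contains (String.ofList c) = true ↔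
      ∃ p ∈ WATCH_DOMAINS.items, p.1.toList = c := by
  rw [PySem.Dict.contains_iff_mem_keys]
  simp only [PySem.Dict.keys, List.mem_map]
  constructor
  · rintro ⟨p, hp, hpk⟩
    exact ⟨p, hp, by rw [hpk]; simp⟩
  · rintro ⟨p, hp, hpk⟩
    exact ⟨p, hp, by rw [← hpk]; simp⟩

-- any dot-headed suffix of c is a suffix of the part of c from its first dot on
theorem maxdot (c s : List Char) (h : ('.' :: s) <:+ c) :
    ('.' :: s) <:+ c.dropWhile (fun c => c != '.') := by
  induction c with
  | nil => simpa using h.length_le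
  | cons a c' ih =>
    rcases List.suffix_cons_iff.mp h with heq | hsuf
    · injection heq with h1 h2
      subst h1; subst h2
      simp
    · have := ih hsuf
      by_cases ha : a = '.'
      · subst ha
        simp only [List.dropWhile_cons, bne_self_eq_false]
        exact (this.trans (List.dropWhile_suffix _)).trans (List.suffix_cons '.' c')
      · simpa [List.dropWhile_cons, ha] using this

-- shape of dropWhile at the first dot
theorem dropWhile_dot_shape (c : List Char) (h : '.' ∈ c) :
    c.dropWhile (fun c => c != '.') = '.' :: (c.dropWhile (fun c => c != '.')).tail := by
  induction c with
  | nil => simp at h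
  | cons a c' ih =>
    by_cases ha : a = '.'
    · subst ha; simp
    · have h' : '.' ∈ c' := by
        rcases List.mem_cons.mp h with h0 | h0
        · exact absurd h0.symm ha
        · exact h0
      simpa [List.dropWhile_cons, ha] using ih h'

-- transfer a dot-aligned suffix down one label
theorem transfer_down (c d : List Char) (h : ('.' :: d) <:+ c) :
    d = (c.dropWhile (fun c => c != '.')).tail ∨
      ('.' :: d) <:+ (c.dropWhile (fun c => c != '.')).tail := by
  have hmem : '.' ∈ c := h.subset (List.mem_cons_self)
  have hmax := maxdot c d h
  rw [dropWhile_dot_shape c hmem] at hmax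
  rcases List.suffix_cons_iff.mp hmax with heq | hsuf
  · exact Or.inl ((List.cons.injEq _ _ _ _ ▸ heq).2)
  · exact Or.inr hsuf

-- transfer a key match up one label
theorem transfer_up (c d : List Char) (hmem : '.' ∈ c)
    (h : KeyMatch d ((c.dropWhile (fun c => c != '.')).tail)) : KeyMatch d c := by
  have hshape := dropWhile_dot_shape c hmem
  have hsufc : (c.dropWhile (fun c => c != '.')) <:+ c := List.dropWhile_suffix _
  rcases h with rfl | hsuf
  · exact Or.inr (hshape ▸ hsufc)
  · refine Or.inr (hsuf.trans ?_)
    exact (List.suffix_cons '.' _).trans (hshape ▸ hsufc)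

-- dot-suffix-related watchlist keys always carry the same scenario (the finite check behind A≡B)
theorem agree :
    ∀ p ∈ WATCH_DOMAINS.items, ∀ p' ∈ WATCH_DOMAINS.items,
      (('.' :: p.1.toList) <:+ ('.' :: p'.1.toList) ∨ ('.' :: p'.1.toList) <:+ ('.' :: p.1.toList)) →
      p.2 = p'.2 := by decide

theorem endswith_dot_iff (c : List Char) (d : String) :
    PySem.Str.endswith (String.ofList c) (String.ofList ('.' :: d.toList)) = true ↔
      ('.' :: d.toList) <:+ c := by
  rw [PySem.Str.endswith_eq]
  simp only [String.toList_ofList]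
  exact PySem.Chars.endswith_iff _ _

theorem scan_step (c : List Char) (d s : String) (rest : List (String × String)) :
    scanWatch (String.ofList c) ((d, s) :: rest) =
      if PySem.Str.endswith (String.ofList c) (String.ofList ('.' :: d.toList)) then some s
      else scanWatch (String.ofList c) rest := rfl

theorem scan_none_iff (c : List Char) (L : List (String × String)) :
    scanWatch (String.ofList c) L = none ↔ ∀ p ∈ L, ¬ (('.' :: p.1.toList) <:+ c) := by
  induction L with
  | nil => simp [scanWatch]
  | cons p rest ih =>
    obtain ⟨d, s⟩ := p
    cases hB : PySem.Str.endswith (String.ofList c) (String.ofList ('.' :: d.toList)) with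
    | true =>
      rw [scan_step, hB, if_pos rfl]
      constructor
      · intro h; exact absurd h (by simp)
      · intro h; exact absurd ((endswith_dot_iff c d).mp hB) (h (d, s) (List.mem_cons_self))
    | false =>
      rw [scan_step, hB, if_neg (by simp), ih]
      constructor
      · intro h p hp
        rcases List.mem_cons.mp hp with rfl | hp'
        · intro hc
          rw [(endswith_dot_iff c _).mpr hc] at hB
          exact absurd hB (by simp)
        · exact h p hp'
      · intro h p hp
        exact h p (List.mem_cons_of_mem _ hp)

theorem scan_some (c : List Char) (L : List (String × String)) (v : String)
    (h : scanWatch (String.ofList c) L = some v) :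
    ∃ p ∈ L, (('.' :: p.1.toList) <:+ c) ∧ p.2 = v := by
  induction L with
  | nil => simp [scanWatch] at h
  | cons p rest ih =>
    obtain ⟨d, s⟩ := p
    cases hB : PySem.Str.endswith (String.ofList c) (String.ofList ('.' :: d.toList)) with
    | true =>
      rw [scan_step, hB, if_pos rfl] at h
      exact ⟨(d, s), List.mem_cons_self, (endswith_dot_iff c d).mp hB, Option.some.inj h⟩
    | false =>
      rw [scan_step, hB, if_neg (by simp)] at h
      obtain ⟨p, hp, hs, hv⟩ := ih h
      exact ⟨p, List.mem_cons_of_mem _ hp, hs, hv⟩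

theorem bloop_none (c : List Char)
    (h : ∀ p ∈ WATCH_DOMAINS.items, ¬ KeyMatch p.1.toList c) : bLoop c = none := by
  rw [bLoop]
  have hc : ¬ WATCH_DOMAINS.contains (String.ofList c) = true := by
    rw [contains_char]
    rintro ⟨p, hp, hpk⟩
    exact h p hp (Or.inl hpk)
  rw [if_neg hc]
  by_cases hd : '.' ∈ c
  · rw [dif_pos hd]
    exact bloop_none _ (fun p hp hk => h p hp (transfer_up c _ hd hk))
  · rw [dif_neg hd]
termination_by c.length
decreasing_by
  have h1 := List.length_dropWhile_le (fun c => c != '.') c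
  have h2 : c.dropWhile (fun c => c != '.') ≠ [] := by
    intro hnil
    have := List.dropWhile_eq_nil_iff.mp hnil '.' hd
    simp at this
  have h3 : 0 < (c.dropWhile (fun c => c != '.')).length := List.length_pos_iff.mpr h2
  simp [List.length_tail]
  omega

theorem bloop_some (c : List Char) (v : String) (h : bLoop c = some v) :
    ∃ p ∈ WATCH_DOMAINS.items, KeyMatch p.1.toList c ∧ p.2 = v := by
  rw [bLoop] at h
  by_cases hc : WATCH_DOMAINS.contains (String.ofList c) = true
  · rw [if_pos hc] at h
    have := PySem.Dict.mem_items_of_get?_eq_some WATCH_DOMAINS h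
    exact ⟨(String.ofList c, v), this, Or.inl (by simp), rfl⟩
  · rw [if_neg hc] at h
    by_cases hd : '.' ∈ c
    · rw [dif_pos hd] at h
      obtain ⟨p, hp, hk, hv⟩ := bloop_some _ v h
      exact ⟨p, hp, transfer_up c _ hd hk, hv⟩
    · rw [dif_neg hd] at h; exact absurd h (by simp)
termination_by c.length
decreasing_by
  have h1 := List.length_dropWhile_le (fun c => c != '.') c
  have h2 : c.dropWhile (fun c => c != '.') ≠ [] := by
    intro hnil
    have := List.dropWhile_eq_nil_iff.mp hnil '.' hd
    simp at this
  have h3 : 0 < (c.dropWhile (fun c => c != '.')).length := List.length_pos_iff.mpr h2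
  simp [List.length_tail]
  omega

theorem bloop_total (c : List Char)
    (h : ∃ p ∈ WATCH_DOMAINS.items, KeyMatch p.1.toList c) : (bLoop c).isSome = true := by
  obtain ⟨p, hp, hk⟩ := h
  rw [bLoop]
  by_cases hc : WATCH_DOMAINS.contains (String.ofList c) = true
  · rw [if_pos hc]
    rw [PySem.Dict.contains_eq_isSome_get?] at hc
    exact hc
  · rw [if_neg hc]
    have hne : p.1.toList ≠ c := by
      intro he
      exact hc ((contains_char c).mpr ⟨p, hp, he⟩)
    have hsuf : ('.' :: p.1.toList) <:+ c := hk.resolve_left hne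
    have hd : '.' ∈ c := hsuf.subset (List.mem_cons_self)
    rw [dif_pos hd]
    apply bloop_total
    rcases transfer_down c p.1.toList hsuf with heq | hs
    · exact ⟨p, hp, Or.inl heq⟩
    · exact ⟨p, hp, Or.inr hs⟩
termination_by c.length
decreasing_by
  have h1 := List.length_dropWhile_le (fun c => c != '.') c
  have h2 : c.dropWhile (fun c => c != '.') ≠ [] := by
    intro hnil
    have := List.dropWhile_eq_nil_iff.mp hnil '.' hd
    simp at this
  have h3 : 0 < (c.dropWhile (fun c => c != '.')).length := List.length_pos_iff.mpr h2
  simp [List.length_tail]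
  omega

theorem main_eq (c : List Char) :
    (if WATCH_DOMAINS.contains (String.ofList c) then WATCH_DOMAINS.get? (String.ofList c)
     else scanWatch (String.ofList c) WATCH_DOMAINS.items) = bLoop c := by
  by_cases hc : WATCH_DOMAINS.contains (String.ofList c) = true
  · rw [if_pos hc, bLoop, if_pos hc]
  · rw [if_neg hc]
    cases hscan : scanWatch (String.ofList c) WATCH_DOMAINS.items with
    | none =>
      have hnos := (scan_none_iff c _).mp hscan
      refine (bloop_none c ?_).symm
      intro p hp hk
      rcases hk with he | hs
      · exact hc ((contains_char c).mpr ⟨p, hp, he⟩)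
      · exact hnos p hp hs
    | some v =>
      obtain ⟨p, hp, hs, hv⟩ := scan_some c _ v hscan
      have hts := bloop_total c ⟨p, hp, Or.inr hs⟩
      obtain ⟨w, hw⟩ := Option.isSome_iff_exists.mp hts
      obtain ⟨p', hp', hk', hv'⟩ := bloop_some c w hw
      have hne' : p'.1.toList ≠ c := by
        intro he
        exact hc ((contains_char c).mpr ⟨p', hp', he⟩)
      have hs' : ('.' :: p'.1.toList) <:+ c := hk'.resolve_left hne'
      have := agree p hp p' hp' (List.suffix_or_suffix_of_suffix hs hs')
      rw [hw, ← hv, ← hv', this]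

-- ===== VERDICT (by name: the statement is the Claim_ definition above) =====
theorem match_scenario_py_spec : Claim_equal_match_scenario_py := by
  intro qname _
  unfold Spec_match_scenario_py match_scenario_py match_scenario_py_alt
  exact main_eq (rstripDot (PySem.Str.lower qname).toList)
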